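-- pv_equiv track=rewrite | github.com/group5sussex/task5 | solver/views.py | transform_piece
-- ===== SOURCE A (Python) =====
-- def generate_mirrors(piece):
--     mirrors = []
--
--     mirror_horizontal = [(row_i, -col_j) for row_i, col_j in piece]
--     mirror_vertical = [(-row_i, col_j) for row_i, col_j in piece]
--
--     mirrors.append(mirror_horizontal)
--     mirrors.append(mirror_vertical)
--
--     return mirrors
--
-- def transform_piece(piece):
--     transformations = []
--
--     mirrors = generate_mirrors(piece)
--
--     for mirror in mirrors:
--         rotate_90 = [(-row, col) for col, row in mirror]
--         rotate_90 = normalize(rotate_90)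
--         if rotate_90 not in transformations:
--             transformations.append(rotate_90)
--
--         rotate_180 = [(-col, -row) for col, row in mirror]
--         rotate_180 = normalize(rotate_180)
--         if rotate_180 not in transformations:
--             transformations.append(rotate_180)
--
--         rotate_270 = [(row, -col) for col, row in mirror]
--         rotate_270 = normalize(rotate_270)
--         if rotate_270 not in transformations:
--             transformations.append(rotate_270)
--
--     return transformations
--
-- def normalize(transformation):
--     min_row = min(row for row, col in transformation)
--     min_col = min(col for row, col in transformation)
--     normalized = [(row - min_row, col - min_col)
--                   for row, col in transformation]
--
--     return normalized
-- ===== SOURCE B (Python) =====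
-- def normalize(transformation):
--     min_row = min(row for row, col in transformation)
--     min_col = min(col for row, col in transformation)
--     return [(row - min_row, col - min_col) for row, col in transformation]
--
-- def transform_piece(piece):
--     # Composing the two mirror maps with the three rotation maps yields only
--     # four distinct coordinate maps (the 4th and 6th composite repeat the 3rd
--     # and 1st verbatim), so apply those four maps directly to the piece.
--     transformations = []
--     for f in ((lambda r, c: (c, r)),
--               (lambda r, c: (-r, c)),
--               (lambda r, c: (-c, -r)),
--               (lambda r, c: (r, -c))):
--         n = normalize([f(r, c) for r, c in piece])
--         if n not in transformations:
--             transformations.append(n)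
--     return transformations
-- ===== Notes on version B (the rewrite author's own statement) =====
-- stated objective: alternative
-- what changed: B drops the mirror-then-rotate enumeration entirely: using that two of A's six mirror+rotation composites are verbatim duplicates, it applies four precomposed symmetry maps directly to the piece and dedups their normalizations in one pass.
import Mathlib
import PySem

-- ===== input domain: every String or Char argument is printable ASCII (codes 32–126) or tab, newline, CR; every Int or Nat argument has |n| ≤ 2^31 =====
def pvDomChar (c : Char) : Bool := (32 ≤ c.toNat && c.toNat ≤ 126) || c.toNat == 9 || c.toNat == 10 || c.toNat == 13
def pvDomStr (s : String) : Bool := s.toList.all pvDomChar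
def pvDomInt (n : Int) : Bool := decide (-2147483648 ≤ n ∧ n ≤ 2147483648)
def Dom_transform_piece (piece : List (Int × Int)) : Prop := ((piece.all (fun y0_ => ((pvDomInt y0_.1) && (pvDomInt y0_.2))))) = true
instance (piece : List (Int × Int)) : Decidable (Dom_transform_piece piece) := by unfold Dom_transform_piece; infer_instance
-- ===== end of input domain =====

-- B applies four precomposed symmetry maps directly (two of A's six mirror+rotation composites are verbatim duplicates); objective: alternative.

-- ===== PORT A =====
-- helper from the same module: generate_mirrors
def generate_mirrorsP (piece : List (Int × Int)) : List (List (Int × Int)) :=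
  [piece.map (fun p => (p.1, -p.2)), piece.map (fun p => (-p.1, p.2))]

-- helper from the same module: normalize; Python's min raises on an empty list (excluded by Pre_), min? returns none there and we return []
def normalizeP (t : List (Int × Int)) : List (Int × Int) :=
  match PySem.List.min? (t.map Prod.fst) (fun x => x), PySem.List.min? (t.map Prod.snd) (fun x => x) with
  | some mr, some mc => t.map (fun p => (p.1 - mr, p.2 - mc))
  | _, _ => []

def transform_piece (piece : List (Int × Int)) : List (List (Int × Int)) :=
  (generate_mirrorsP piece).foldl (fun transformations mirror =>
    let rotate_90 := normalizeP (mirror.map (fun p => (-p.2, p.1)))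
    let transformations := if rotate_90 ∈ transformations then transformations else transformations ++ [rotate_90]
    let rotate_180 := normalizeP (mirror.map (fun p => (-p.1, -p.2)))
    let transformations := if rotate_180 ∈ transformations then transformations else transformations ++ [rotate_180]
    let rotate_270 := normalizeP (mirror.map (fun p => (p.2, -p.1)))
    if rotate_270 ∈ transformations then transformations else transformations ++ [rotate_270]) []

-- ===== PORT B =====
def transform_piece_alt (piece : List (Int × Int)) : List (List (Int × Int)) :=
  ([fun (r c : Int) => (c, r), fun (r c : Int) => (-r, c),
    fun (r c : Int) => (-c, -r), fun (r c : Int) => (r, -c)] :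
      List (Int → Int → Int × Int)).foldl (fun transformations f =>
    let n := normalizeP (piece.map (fun p => f p.1 p.2))
    if n ∈ transformations then transformations else transformations ++ [n]) []

-- ===== PRECONDITION & SPEC =====
-- Pre_ excludes only the empty piece, on which Python's min (inside normalize) raises ValueError in both A and B.
def Pre_transform_piece (piece : List (Int × Int)) : Prop := piece ≠ []
instance (piece : List (Int × Int)) : Decidable (Pre_transform_piece piece) := by unfold Pre_transform_piece; infer_instance
def pvWitness_transform_piece : (List (Int × Int)) := [(0, 0), (0, 1)]
def Spec_transform_piece (piece : List (Int × Int)) (out : List (List (Int × Int))) : Prop := out = transform_piece_alt piece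
instance (piece : List (Int × Int)) (out : List (List (Int × Int))) : Decidable (Spec_transform_piece piece out) := by unfold Spec_transform_piece; infer_instance

-- ===== CLAIM (what is proved, stated in full; the proofs are below) =====
def Claim_equal_transform_piece : Prop := ∀ (piece : List (Int × Int)), Dom_transform_piece piece → Pre_transform_piece piece → Spec_transform_piece piece (transform_piece piece)

-- ===== LEMMAS AND PROOFS =====

-- the dedup-append step shared by both ports
def insT (ts : List (List (Int × Int))) (n : List (Int × Int)) : List (List (Int × Int)) :=
  if n ∈ ts then ts else ts ++ [n]

theorem mem_insT_self (ts : List (List (Int × Int))) (n : List (Int × Int)) : n ∈ insT ts n := by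
  unfold insT; split_ifs with h
  · exact h
  · simp

theorem mem_insT_of_mem (ts : List (List (Int × Int))) (n m : List (Int × Int)) (h : n ∈ ts) : n ∈ insT ts m := by
  unfold insT; split_ifs
  · exact h
  · exact List.mem_append_left _ h

theorem insT_of_mem (ts : List (List (Int × Int))) (n : List (Int × Int)) (h : n ∈ ts) : insT ts n = ts := by
  unfold insT; simp [h]

theorem transform_piece_spec : Claim_equal_transform_piece := by
  intro piece _ _
  unfold Spec_transform_piece transform_piece transform_piece_alt generate_mirrorsP
  show List.foldl _ [] [_, _] = List.foldl _ [] [_, _, _, _]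
  simp only [List.foldl, List.map_map, Function.comp_def, neg_neg]
  -- A's six candidates reduce to n1 n2 n3 n3 n5 n1; fold both sides into insT form
  show (insT (insT (insT (insT (insT (insT [] _) _) _) _) _) _) =
       (insT (insT (insT (insT [] _) _) _) _)
  rw [insT_of_mem _ _ (mem_insT_self _ _)]
  exact insT_of_mem _ _ (mem_insT_of_mem _ _ _
    (mem_insT_of_mem _ _ _ (mem_insT_of_mem _ _ _ (mem_insT_self _ _))))
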